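-- pv_equiv track=rewrite | github.com/andriyze/aws-tagger | taggerlib/parent_tag_read_ops.py | classify_unresolved_inheritance_reason
-- ===== SOURCE A (Python) =====
-- def classify_unresolved_inheritance_reason(parent_arns, tagapi_status_by_arn, native_status_by_arn):
--     """
--     Classify why parent-tag inheritance remained unresolved for a child resource.
--     """
--     statuses = []
--     for arn in parent_arns:
--         if arn in tagapi_status_by_arn:
--             statuses.append(tagapi_status_by_arn[arn])
--         if arn in native_status_by_arn:
--             statuses.append(native_status_by_arn[arn])
--
--     if any(s == 'access_denied' for s in statuses):
--         return 'lookup_access_denied'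
--     if any(s == 'error' for s in statuses):
--         return 'lookup_error'
--     if any(s in {'unsupported_service', 'unsupported_arn_format'} for s in statuses):
--         return 'unsupported_parent_type'
--     if any(s == 'not_found' for s in statuses):
--         return 'parent_not_visible'
--     return 'parent_unresolved'
-- ===== SOURCE B (Python) =====
-- _REASONS = ('lookup_access_denied', 'lookup_error', 'unsupported_parent_type',
--             'parent_not_visible', 'parent_unresolved')
--
--
-- def _rank(status):
--     if status == 'access_denied':
--         return 0
--     if status == 'error':
--         return 1
--     if status in ('unsupported_service', 'unsupported_arn_format'):
--         return 2
--     if status == 'not_found':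
--         return 3
--     return 4
--
--
-- def classify_unresolved_inheritance_reason(parent_arns, tagapi_status_by_arn, native_status_by_arn):
--     """Single priority-reducing pass: keep the lowest rank seen, then one table lookup."""
--     best = 4
--     for arn in parent_arns:
--         if arn in tagapi_status_by_arn:
--             best = min(best, _rank(tagapi_status_by_arn[arn]))
--         if arn in native_status_by_arn:
--             best = min(best, _rank(native_status_by_arn[arn]))
--     return _REASONS[best]
-- ===== Notes on version B (the rewrite author's own statement) =====
-- stated objective: alternative
-- what changed: Instead of materialising the status list and scanning it four times with ordered any() passes, B makes one priority-reducing pass over the parents keeping the minimum rank seen and finishes with a single table lookup.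
import Mathlib
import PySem

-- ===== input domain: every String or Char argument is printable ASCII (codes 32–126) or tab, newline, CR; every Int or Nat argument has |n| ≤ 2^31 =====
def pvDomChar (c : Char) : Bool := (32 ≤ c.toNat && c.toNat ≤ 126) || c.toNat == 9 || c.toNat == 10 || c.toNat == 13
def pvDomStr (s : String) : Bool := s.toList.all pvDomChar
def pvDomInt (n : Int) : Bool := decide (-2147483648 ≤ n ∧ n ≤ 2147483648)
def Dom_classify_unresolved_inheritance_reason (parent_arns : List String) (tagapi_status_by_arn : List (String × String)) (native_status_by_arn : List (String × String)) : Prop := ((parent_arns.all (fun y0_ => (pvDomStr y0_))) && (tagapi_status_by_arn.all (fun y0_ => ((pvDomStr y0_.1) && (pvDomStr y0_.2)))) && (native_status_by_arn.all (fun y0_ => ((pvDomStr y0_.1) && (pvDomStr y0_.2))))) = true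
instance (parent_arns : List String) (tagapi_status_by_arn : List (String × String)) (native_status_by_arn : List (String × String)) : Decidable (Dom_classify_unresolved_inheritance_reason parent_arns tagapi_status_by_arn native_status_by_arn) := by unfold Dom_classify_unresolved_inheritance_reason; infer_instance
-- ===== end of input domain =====

-- B replaces A's status list plus four ordered any() scans by one priority-reducing
-- pass keeping the minimum rank and a final table lookup (alternative decomposition).

-- ===== PORT A =====
def classify_unresolved_inheritance_reason (parent_arns : List String) (tagapi_status_by_arn : List (String × String)) (native_status_by_arn : List (String × String)) : String :=
  -- statuses = []; for arn in parent_arns: append on membership hits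
  let statuses : List String := parent_arns.foldl (fun acc arn =>
    let acc := match (PySem.Dict.mk tagapi_status_by_arn).get? arn with
      | some v => acc ++ [v]
      | none => acc
    match (PySem.Dict.mk native_status_by_arn).get? arn with
      | some v => acc ++ [v]
      | none => acc) []
  if statuses.any (fun s => s == "access_denied") then "lookup_access_denied"
  else if statuses.any (fun s => s == "error") then "lookup_error"
  else if statuses.any (fun s => s == "unsupported_service" || s == "unsupported_arn_format") then "unsupported_parent_type"
  else if statuses.any (fun s => s == "not_found") then "parent_not_visible"
  else "parent_unresolved"

-- ===== PORT B =====
-- _rank(status) from Source B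
def pvRank (status : String) : Nat :=
  if status == "access_denied" then 0
  else if status == "error" then 1
  else if status == "unsupported_service" || status == "unsupported_arn_format" then 2
  else if status == "not_found" then 3
  else 4

-- _REASONS from Source B
def pvReasons : List String :=
  ["lookup_access_denied", "lookup_error", "unsupported_parent_type", "parent_not_visible", "parent_unresolved"]

def classify_unresolved_inheritance_reason_alt (parent_arns : List String) (tagapi_status_by_arn : List (String × String)) (native_status_by_arn : List (String × String)) : String :=
  let best : Nat := parent_arns.foldl (fun best arn =>
    let best := match (PySem.Dict.mk tagapi_status_by_arn).get? arn with
      | some v => min best (pvRank v)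
      | none => best
    match (PySem.Dict.mk native_status_by_arn).get? arn with
      | some v => min best (pvRank v)
      | none => best) 4
  -- _REASONS[best]: best ≤ 4 always, so the getD default is never reached (exact port)
  pvReasons.getD best "parent_unresolved"

-- ===== PRECONDITION & SPEC =====
def Spec_classify_unresolved_inheritance_reason (parent_arns : List String) (tagapi_status_by_arn : List (String × String)) (native_status_by_arn : List (String × String)) (out : String) : Prop := out = classify_unresolved_inheritance_reason_alt parent_arns tagapi_status_by_arn native_status_by_arn
instance (parent_arns : List String) (tagapi_status_by_arn : List (String × String)) (native_status_by_arn : List (String × String)) (out : String) : Decidable (Spec_classify_unresolved_inheritance_reason parent_arns tagapi_status_by_arn native_status_by_arn out) := by unfold Spec_classify_unresolved_inheritance_reason; infer_instance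

-- ===== CLAIM (what is proved, stated in full; the proofs are below) =====
def Claim_equal_classify_unresolved_inheritance_reason : Prop := ∀ (parent_arns : List String) (tagapi_status_by_arn : List (String × String)) (native_status_by_arn : List (String × String)), Dom_classify_unresolved_inheritance_reason parent_arns tagapi_status_by_arn native_status_by_arn → Spec_classify_unresolved_inheritance_reason parent_arns tagapi_status_by_arn native_status_by_arn (classify_unresolved_inheritance_reason parent_arns tagapi_status_by_arn native_status_by_arn)

-- ===== LEMMAS AND PROOFS =====

-- per-arn contribution of A's loop body
def pvG (t n : List (String × String)) (arn : String) : List String :=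
  (match (PySem.Dict.mk t).get? arn with | some v => [v] | none => []) ++
  (match (PySem.Dict.mk n).get? arn with | some v => [v] | none => [])

-- running minimum of ranks, foldr form
def pvMr (l : List String) (b : Nat) : Nat := l.foldr (fun s b => min (pvRank s) b) b

lemma pvMr_le (l : List String) (b : Nat) : pvMr l b ≤ b := by
  induction l with
  | nil => simp [pvMr]
  | cons s t ih => simp only [pvMr, List.foldr] at *; omega

lemma pvMr_append (x y : List String) (b : Nat) : pvMr (x ++ y) b = pvMr x (pvMr y b) := by
  simp [pvMr, List.foldr_append]

lemma pvMr_min (l : List String) (b c : Nat) : pvMr l (min b c) = min (pvMr l b) c := by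
  induction l with
  | nil => simp [pvMr]
  | cons s t ih => simp only [pvMr, List.foldr] at *; rw [ih]; omega

lemma pvMr_eq_min (l : List String) (b : Nat) (hb : b ≤ 4) : pvMr l b = min (pvMr l 4) b := by
  have h : min (4 : Nat) b = b := by omega
  rw [← h, pvMr_min, h]

lemma pvMr_comm (x y : List String) (b : Nat) (hb : b ≤ 4) :
    pvMr y (pvMr x b) = pvMr x (pvMr y b) := by
  rw [pvMr_eq_min x b hb, pvMr_min, pvMr_eq_min y b hb, pvMr_min,
      pvMr_eq_min y (pvMr x 4) (pvMr_le _ _), pvMr_eq_min x (pvMr y 4) (pvMr_le _ _)]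
  omega

-- A's status accumulation is the flatMap of per-arn contributions
lemma statuses_eq (pa : List String) (t n : List (String × String)) (acc : List String) :
    pa.foldl (fun acc arn =>
      let acc := match (PySem.Dict.mk t).get? arn with
        | some v => acc ++ [v]
        | none => acc
      match (PySem.Dict.mk n).get? arn with
        | some v => acc ++ [v]
        | none => acc) acc = acc ++ pa.flatMap (pvG t n) := by
  induction pa generalizing acc with
  | nil => simp
  | cons a pa ih =>
    simp only [List.foldl, List.flatMap_cons, ih, pvG]
    cases (PySem.Dict.mk t).get? a <;> cases (PySem.Dict.mk n).get? a <;> simp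

-- B's fold computes the running minimum of ranks over the same contributions
lemma best_eq (pa : List String) (t n : List (String × String)) (b : Nat) (hb : b ≤ 4) :
    pa.foldl (fun best arn =>
      let best := match (PySem.Dict.mk t).get? arn with
        | some v => min best (pvRank v)
        | none => best
      match (PySem.Dict.mk n).get? arn with
        | some v => min best (pvRank v)
        | none => best) b = pvMr (pa.flatMap (pvG t n)) b := by
  induction pa generalizing b with
  | nil => simp [pvMr]
  | cons a pa ih =>
    simp only [List.foldl, List.flatMap_cons]
    have hstep : (let best := match (PySem.Dict.mk t).get? a with
        | some v => min b (pvRank v)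
        | none => b
      match (PySem.Dict.mk n).get? a with
        | some v => min best (pvRank v)
        | none => best) = pvMr (pvG t n a) b := by
      simp only [pvG, pvMr, List.foldr_append]
      cases (PySem.Dict.mk t).get? a <;> cases (PySem.Dict.mk n).get? a <;>
        simp only [List.foldr] <;> simp [Nat.min_comm, Nat.min_left_comm]
    rw [pvMr_append, hstep, ih _ (le_trans (pvMr_le _ _) hb)]
    exact pvMr_comm _ _ _ hb

lemma pvMr_le_iff (l : List String) (k : Nat) (hk : k < 4) :
    pvMr l 4 ≤ k ↔ l.any (fun s => pvRank s ≤ k) = true := by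
  induction l with
  | nil => simp [pvMr]; omega
  | cons s t ih =>
    simp only [pvMr, List.foldr] at *
    rw [min_le_iff, ih]
    simp

lemma pvRank_le_zero (s : String) : pvRank s ≤ 0 ↔ s = "access_denied" := by
  unfold pvRank; split_ifs with h1 h2 h3 h4 <;> simp_all

lemma pvRank_le_one (s : String) : pvRank s ≤ 1 ↔ s = "access_denied" ∨ s = "error" := by
  unfold pvRank; split_ifs with h1 h2 h3 h4 <;> simp_all

lemma pvRank_le_two (s : String) :
    pvRank s ≤ 2 ↔ s = "access_denied" ∨ s = "error" ∨ s = "unsupported_service" ∨ s = "unsupported_arn_format" := by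
  unfold pvRank; split_ifs with h1 h2 h3 h4 <;> simp_all

lemma pvRank_le_three (s : String) :
    pvRank s ≤ 3 ↔ s = "access_denied" ∨ s = "error" ∨ s = "unsupported_service" ∨ s = "unsupported_arn_format" ∨ s = "not_found" := by
  unfold pvRank; split_ifs with h1 h2 h3 h4 <;> simp_all
  tauto

-- A's four-scan if-chain equals B's table lookup at the minimum rank
set_option maxHeartbeats 1000000 in
lemma chain_eq (l : List String) :
    (if l.any (fun s => s == "access_denied") then "lookup_access_denied"
     else if l.any (fun s => s == "error") then "lookup_error"
     else if l.any (fun s => s == "unsupported_service" || s == "unsupported_arn_format") then "unsupported_parent_type"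
     else if l.any (fun s => s == "not_found") then "parent_not_visible"
     else "parent_unresolved") = pvReasons.getD (pvMr l 4) "parent_unresolved" := by
  have h0 := pvMr_le_iff l 0 (by omega)
  have h1 := pvMr_le_iff l 1 (by omega)
  have h2 := pvMr_le_iff l 2 (by omega)
  have h3 := pvMr_le_iff l 3 (by omega)
  simp only [List.any_eq_true, decide_eq_true_eq, Bool.or_eq_true, beq_iff_eq,
    pvRank_le_zero, pvRank_le_one, pvRank_le_two, pvRank_le_three] at h0 h1 h2 h3 ⊢
  split_ifs with c0 c1 c2 c3
  · obtain ⟨s, hs, he⟩ := c0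
    have h : pvMr l 4 ≤ 0 := h0.2 ⟨s, hs, he⟩
    have h' : pvMr l 4 = 0 := by omega
    simp [h', pvReasons]
  · have hlt : ¬ pvMr l 4 ≤ 0 := fun h => c0 (h0.1 h)
    obtain ⟨s, hs, he⟩ := c1
    have : pvMr l 4 ≤ 1 := h1.2 ⟨s, hs, Or.inr he⟩
    have : pvMr l 4 = 1 := by omega
    simp [this, pvReasons]
  · have hlt : ¬ pvMr l 4 ≤ 1 := by
      intro h
      rcases h1.1 h with ⟨s, hs, he | he⟩
      · exact c0 ⟨s, hs, he⟩
      · exact c1 ⟨s, hs, he⟩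
    obtain ⟨s, hs, he⟩ := c2
    have : pvMr l 4 ≤ 2 := h2.2 ⟨s, hs, by tauto⟩
    have : pvMr l 4 = 2 := by omega
    simp [this, pvReasons]
  · have hlt : ¬ pvMr l 4 ≤ 2 := by
      intro h
      rcases h2.1 h with ⟨s, hs, he | he | he | he⟩
      · exact c0 ⟨s, hs, he⟩
      · exact c1 ⟨s, hs, he⟩
      · exact c2 ⟨s, hs, Or.inl he⟩
      · exact c2 ⟨s, hs, Or.inr he⟩
    obtain ⟨s, hs, he⟩ := c3
    have : pvMr l 4 ≤ 3 := h3.2 ⟨s, hs, by tauto⟩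
    have : pvMr l 4 = 3 := by omega
    simp [this, pvReasons]
  · have hlt : ¬ pvMr l 4 ≤ 3 := by
      intro h
      rcases h3.1 h with ⟨s, hs, he | he | he | he | he⟩
      · exact c0 ⟨s, hs, he⟩
      · exact c1 ⟨s, hs, he⟩
      · exact c2 ⟨s, hs, Or.inl he⟩
      · exact c2 ⟨s, hs, Or.inr he⟩
      · exact c3 ⟨s, hs, he⟩
    have hle : pvMr l 4 ≤ 4 := pvMr_le _ _
    have : pvMr l 4 = 4 := by omega
    simp [this, pvReasons]

-- ===== VERDICT (by name: the statement is the Claim_ definition above) =====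
theorem classify_unresolved_inheritance_reason_spec : Claim_equal_classify_unresolved_inheritance_reason := by
  intro pa t n _
  unfold Spec_classify_unresolved_inheritance_reason
  unfold classify_unresolved_inheritance_reason classify_unresolved_inheritance_reason_alt
  rw [statuses_eq, best_eq pa t n 4 (by omega), List.nil_append, chain_eq]
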